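-- pv_equiv track=rewrite | github.com/kunzaZa183/APCSP | sumFirst_231031_asgmt_Kun.py | go
-- ===== SOURCE A (Python) =====
-- def go(lst):
--     if len(lst) == 0:
--         return -1
--     have = False
--     for i in lst:
--         if i > lst[0]:
--             have = True
--     if not have:
--         return -1
--     sum = 0
--     for i in lst:
--         if i > lst[0]:
--             sum += i
--     return sum
-- ===== SOURCE B (Python) =====
-- def go(lst):
--     if len(lst) == 0:
--         return -1
--     first = lst[0]
--     s = sorted(lst, reverse=True)
--     k = 0
--     while k < len(s) and s[k] > first:
--         k += 1
--     if k == 0: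
--         return -1
--     return sum(s[:k])
-- ===== Notes on version B (the rewrite author's own statement) =====
-- stated objective: alternative
-- what changed: Instead of A's two linear filter scans, B sorts the list in descending order, locates the boundary of the strictly-greater prefix by a single while loop, and sums that prefix slice (correct because on a descending list the elements greater than lst[0] form exactly the initial prefix).
import Mathlib
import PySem

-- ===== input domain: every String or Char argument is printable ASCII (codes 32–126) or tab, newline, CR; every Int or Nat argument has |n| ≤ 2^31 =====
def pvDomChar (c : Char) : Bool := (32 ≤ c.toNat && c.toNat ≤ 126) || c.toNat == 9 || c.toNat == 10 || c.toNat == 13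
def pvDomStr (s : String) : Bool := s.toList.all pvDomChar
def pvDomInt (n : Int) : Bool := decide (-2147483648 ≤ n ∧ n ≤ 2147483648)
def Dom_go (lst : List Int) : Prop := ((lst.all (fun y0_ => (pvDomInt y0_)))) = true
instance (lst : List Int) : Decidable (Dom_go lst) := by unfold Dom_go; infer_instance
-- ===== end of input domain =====

-- B replaces A's two filter scans with sort-descending, boundary scan, prefix sum; same result.

-- ===== PORT A =====
def go (lst : List Int) : Int :=
  match lst with
  | [] => -1
  | h :: _ =>
    let haveFlag := lst.foldl (fun b i => if i > h then true else b) false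
    if !haveFlag then -1
    else lst.foldl (fun s i => if i > h then s + i else s) 0

-- ===== PORT B =====
-- the 'while k < len(s) and s[k] > first: k += 1' loop: counts the strictly-greater prefix
def goBound (s : List Int) (first : Int) : Nat :=
  match s with
  | [] => 0
  | x :: t => if x > first then goBound t first + 1 else 0

def go_alt (lst : List Int) : Int :=
  match lst with
  | [] => -1
  | first :: _ =>
    let s := PySem.List.sorted lst (fun x => x) true
    let k := goBound s first
    if k = 0 then -1
    else ((s.take k).sum)

-- ===== PRECONDITION & SPEC =====
def Spec_go (lst : List Int) (out : Int) : Prop := out = go_alt lst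
instance (lst : List Int) (out : Int) : Decidable (Spec_go lst out) := by unfold Spec_go; infer_instance

-- ===== CLAIM (what is proved, stated in full; the proofs are below) =====
def Claim_equal_go : Prop := ∀ (lst : List Int), Dom_go lst → Spec_go lst (go lst)

-- ===== LEMMAS AND PROOFS =====
theorem go_flag_fold (l : List Int) (h : Int) : ∀ b : Bool,
    l.foldl (fun b i => if i > h then true else b) b
    = (b || l.any (fun i => decide (i > h))) := by
  induction l with
  | nil => intro b; simp [List.foldl]
  | cons x xs ih =>
    intro b
    simp only [List.foldl, List.any_cons]
    by_cases hx : x > h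
    · rw [if_pos hx, ih]; simp [hx]
    · rw [if_neg hx, ih]; simp [hx]

theorem go_sum_fold (l : List Int) (h : Int) : ∀ s : Int,
    l.foldl (fun s i => if i > h then s + i else s) s
    = s + (l.filter (fun i => decide (i > h))).sum := by
  induction l with
  | nil => intro s; simp [List.foldl]
  | cons x xs ih =>
    intro s
    simp only [List.foldl, List.filter]
    by_cases hx : x > h
    · simp [hx, ih]; ring
    · simp [hx, ih]

-- on a descending list the strictly-greater prefix IS the filter
theorem goBound_take (s : List Int) (c : Int)
    (hp : s.Pairwise (fun a b => b ≤ a)) :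
    s.take (goBound s c) = s.filter (fun x => decide (x > c)) := by
  induction s with
  | nil => rfl
  | cons x t ih =>
    rcases List.pairwise_cons.mp hp with ⟨hall, hrest⟩
    by_cases hx : x > c
    · simp [goBound, hx, List.filter, ih hrest]
    · have : t.filter (fun y => decide (y > c)) = [] := by
        apply List.filter_eq_nil_iff.mpr
        intro y hy
        have := hall y hy
        simp; omega
      simp [goBound, hx, List.filter, this]

theorem goBound_eq_zero (s : List Int) (c : Int)
    (hp : s.Pairwise (fun a b => b ≤ a)) :
    (goBound s c = 0) ↔ s.filter (fun x => decide (x > c)) = [] := by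
  cases s with
  | nil => simp [goBound]
  | cons x t =>
    rcases List.pairwise_cons.mp hp with ⟨hall, hrest⟩
    by_cases hx : x > c
    · simp [goBound, hx, List.filter]
    · constructor
      · intro _
        apply List.filter_eq_nil_iff.mpr
        intro y hy
        simp only [List.mem_cons] at hy
        rcases hy with rfl | hy
        · simp; omega
        · have := hall y hy; simp; omega
      · intro _; simp [goBound, hx]

-- ===== VERDICT (by name: the statement is the Claim_ definition above) =====
theorem go_spec : Claim_equal_go := by
  intro lst _
  unfold Spec_go go go_alt
  cases lst with
  | nil => rfl
  | cons h t =>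
    have hperm := PySem.List.sorted_perm (h :: t) (fun x : Int => x) true
    have hpw : (PySem.List.sorted (h :: t) (fun x : Int => x) true).Pairwise
        (fun a b => b ≤ a) := by
      simpa using PySem.List.sorted_pairwise_rev (xs := h :: t) (key := fun x : Int => x)
    show (if (!(List.foldl (fun b i => if i > h then true else b) false (h :: t))) = true
            then -1 else List.foldl (fun s i => if i > h then s + i else s) 0 (h :: t))
        = (if goBound (PySem.List.sorted (h :: t) (fun x : Int => x) true) h = 0 then -1
            else (List.take (goBound (PySem.List.sorted (h :: t) (fun x : Int => x) true) h)
              (PySem.List.sorted (h :: t) (fun x : Int => x) true)).sum)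
    rw [go_flag_fold, go_sum_fold]
    generalize hsdef : PySem.List.sorted (h :: t) (fun x : Int => x) true = s at hperm hpw ⊢
    have hfilt : List.Perm ((h :: t).filter (fun x => decide (x > h)))
        (s.filter (fun x => decide (x > h))) := (hperm.filter _).symm
    rw [goBound_take s h hpw]
    by_cases hz : goBound s h = 0
    · have hnil : s.filter (fun x => decide (x > h)) = [] :=
        (goBound_eq_zero s h hpw).mp hz
      have hLnil : (h :: t).filter (fun x => decide (x > h)) = [] :=
        List.Perm.eq_nil (hnil ▸ hfilt)
      have hany : ((h :: t).any (fun i => decide (i > h))) = false := by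
        rw [List.any_eq_false]
        intro x hx
        have := List.filter_eq_nil_iff.mp hLnil x hx
        simpa using this
      simp [hz, hany]
    · have hne : s.filter (fun x => decide (x > h)) ≠ [] := fun hc =>
        hz ((goBound_eq_zero s h hpw).mpr hc)
      have hany : ((h :: t).any (fun i => decide (i > h))) = true := by
        rcases List.exists_mem_of_ne_nil _ hne with ⟨x, hx⟩
        rcases List.mem_filter.mp hx with ⟨hxm, hxp⟩
        exact List.any_eq_true.mpr ⟨x, (hperm.mem_iff).mp hxm, hxp⟩
      have hsum : ((h :: t).filter (fun x => decide (x > h))).sum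
          = (s.filter (fun x => decide (x > h))).sum := hfilt.sum_eq
      have hcond : (!(false || (h :: t).any fun i => decide (i > h))) = false := by
        rw [hany]; rfl
      rw [hcond, if_neg hz]
      simp only [Bool.false_eq_true, if_false, zero_add]
      exact hsum
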